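-- pv_equiv track=rewrite | github.com/ivarg/aoc-2020 | 12.py | doturtle
-- ===== SOURCE A (Python) =====
-- def doturtle(ops):
--     d = 0
--     nops = []
--     for (o,n) in ops:
--         if o=="F":
--             nops += [("ESWN"[d], n)]
--         else:
--             d = (d+int(n/90))%4 if o=="R" else (d-int(n/90))%4
--     return nops
-- ===== SOURCE B (Python) =====
-- def doturtle(ops):
--     # Two-pass decomposition: first build the running direction before each op
--     # (F contributes rotation 0, R +int(n/90), anything else -int(n/90)),
--     # then keep the 'F' ops, naming the direction by indexing "ESWN" mod 4.
--     def delta(o, n):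
--         if o == "F":
--             return 0
--         t = int(n / 90)
--         return t if o == "R" else -t
--     dirs = []
--     d = 0
--     for o, n in ops:
--         dirs.append(d)
--         d += delta(o, n)
--     return [("ESWN"[d % 4], n) for (o, n), d in zip(ops, dirs) if o == "F"]
-- ===== Notes on version B (the rewrite author's own statement) =====
-- stated objective: alternative
-- what changed: Replaces A's single stateful loop (direction reduced mod 4 at every turn, output appended in the branch) with a two-pass decomposition: one pass builds the unreduced running rotation count before each op, then a comprehension over zip(ops, dirs) keeps the 'F' ops and names the direction by indexing "ESWN" with mod 4 applied only at use.
import Mathlib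
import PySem

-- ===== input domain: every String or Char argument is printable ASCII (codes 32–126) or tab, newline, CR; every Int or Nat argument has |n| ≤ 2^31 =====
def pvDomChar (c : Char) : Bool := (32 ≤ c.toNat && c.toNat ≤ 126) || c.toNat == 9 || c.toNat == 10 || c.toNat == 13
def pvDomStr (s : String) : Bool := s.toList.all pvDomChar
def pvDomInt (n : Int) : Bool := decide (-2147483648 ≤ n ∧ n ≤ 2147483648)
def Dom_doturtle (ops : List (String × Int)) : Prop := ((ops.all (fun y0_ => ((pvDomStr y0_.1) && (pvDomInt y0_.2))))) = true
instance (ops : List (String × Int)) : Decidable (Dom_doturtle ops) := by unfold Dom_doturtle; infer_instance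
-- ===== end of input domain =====

-- B is a two-pass decomposition (running rotation count, then a filtering comprehension); same values as A.
-- Note: Python's int(n/90) truncates toward zero; on |n| ≤ 2^31 the float division is exact enough that
-- int(n/90) = Int.tdiv n 90, which is how both ports render it (exact on the stated domain).

-- ===== PORT A =====
-- "ESWN"[d] : Python string indexing; d is always in [0,4) here, so the default branch is never taken.
def pvEswn (d : Int) : String :=
  ((PySem.List.pyGet? "ESWN".toList d).map (fun c => String.mk [c])).getD ""

def doturtle (ops : List (String × Int)) : List (String × Int) :=
  (ops.foldl
    (fun (st : Int × List (String × Int)) p =>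
      if p.1 == "F" then (st.1, st.2 ++ [(pvEswn st.1, p.2)])
      else if p.1 == "R" then (PySem.Int.mod (st.1 + Int.tdiv p.2 90) 4, st.2)
      else (PySem.Int.mod (st.1 - Int.tdiv p.2 90) 4, st.2))
    (0, [])).2

-- ===== PORT B =====
def pvDelta (o : String) (n : Int) : Int :=
  if o == "F" then 0
  else if o == "R" then Int.tdiv n 90
  else -(Int.tdiv n 90)

def doturtle_alt (ops : List (String × Int)) : List (String × Int) :=
  let dirs := (ops.foldl
      (fun (st : Int × List Int) p => (st.1 + pvDelta p.1 p.2, st.2 ++ [st.1]))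
      (0, [])).2
  (ops.zip dirs).filterMap
    (fun q => if q.1.1 == "F" then some (pvEswn (PySem.Int.mod q.2 4), q.1.2) else none)

-- ===== PRECONDITION & SPEC =====
def Spec_doturtle (ops : List (String × Int)) (out : List (String × Int)) : Prop := out = doturtle_alt ops
instance (ops : List (String × Int)) (out : List (String × Int)) : Decidable (Spec_doturtle ops out) := by unfold Spec_doturtle; infer_instance

-- ===== CLAIM (what is proved, stated in full; the proofs are below) =====
def Claim_equal_doturtle : Prop := ∀ (ops : List (String × Int)), Dom_doturtle ops → Spec_doturtle ops (doturtle ops)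

-- ===== LEMMAS AND PROOFS =====

-- the list of running directions B's first pass produces, as a structural recursion
def pvDirs : List (String × Int) → Int → List Int
  | [], _ => []
  | p :: t, d => d :: pvDirs t (d + pvDelta p.1 p.2)

lemma pvFoldB_snd : ∀ (ops : List (String × Int)) (d : Int) (acc : List Int),
    (ops.foldl (fun (st : Int × List Int) p => (st.1 + pvDelta p.1 p.2, st.2 ++ [st.1])) (d, acc)).2
      = acc ++ pvDirs ops d := by
  intro ops
  induction ops with
  | nil => intro d acc; simp [pvDirs]
  | cons p t ih => intro d acc; simp [List.foldl, pvDirs, ih]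

lemma pvMod_shift (a t : Int) : PySem.Int.mod (PySem.Int.mod a 4 + t) 4 = PySem.Int.mod (a + t) 4 := by
  simp only [PySem.Int.mod_eq_emod_of_pos (show (0:Int) < 4 by norm_num)]
  omega

lemma pvMain : ∀ (ops : List (String × Int)) (d : Int) (acc : List (String × Int)),
    (ops.foldl
      (fun (st : Int × List (String × Int)) p =>
        if p.1 == "F" then (st.1, st.2 ++ [(pvEswn st.1, p.2)])
        else if p.1 == "R" then (PySem.Int.mod (st.1 + Int.tdiv p.2 90) 4, st.2)
        else (PySem.Int.mod (st.1 - Int.tdiv p.2 90) 4, st.2))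
      (PySem.Int.mod d 4, acc)).2
    = acc ++ (ops.zip (pvDirs ops d)).filterMap
        (fun q => if q.1.1 == "F" then some (pvEswn (PySem.Int.mod q.2 4), q.1.2) else none) := by
  intro ops
  induction ops with
  | nil => intro d acc; simp
  | cons p t ih =>
    intro d acc
    simp only [beq_iff_eq] at ih
    by_cases hF : p.1 = "F"
    · simp only [List.foldl, pvDirs, List.zip_cons_cons, List.filterMap_cons, hF,
        beq_iff_eq, String.reduceEq, reduceIte, pvDelta]
      rw [show d + 0 = d from by ring, ih d (acc ++ [(pvEswn (PySem.Int.mod d 4), p.2)])]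
      simp
    · by_cases hR : p.1 = "R"
      · simp only [List.foldl, pvDirs, List.zip_cons_cons, List.filterMap_cons, hR, pvDelta,
          beq_iff_eq, String.reduceEq, reduceIte]
        rw [pvMod_shift d (Int.tdiv p.2 90), ih (d + Int.tdiv p.2 90) acc]
      · simp only [List.foldl, pvDirs, List.zip_cons_cons, List.filterMap_cons, hF, hR, pvDelta,
          beq_iff_eq, reduceIte]
        rw [show PySem.Int.mod d 4 - Int.tdiv p.2 90 = PySem.Int.mod d 4 + (-(Int.tdiv p.2 90)) from by ring,
          pvMod_shift d (-(Int.tdiv p.2 90)), ih (d + -(Int.tdiv p.2 90)) acc]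

-- ===== VERDICT (by name: the statement is the Claim_ definition above) =====
theorem doturtle_spec : Claim_equal_doturtle := by
  intro ops _
  show doturtle ops = doturtle_alt ops
  unfold doturtle doturtle_alt
  rw [pvFoldB_snd ops 0 []]
  have h := pvMain ops 0 []
  simpa [PySem.Int.mod] using h
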